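-- pv_equiv track=rewrite | github.com/zwvista/LogicPuzzlesAutomator | Puzzles/Parks/main.py | create_grid_string
-- ===== SOURCE A (Python) =====
-- def create_grid_string(coded_matrix: list[list[int]]) -> str:
--     """
--     根据颜色数字矩阵生成一个代表网格布局的多行字符串。
--
--     参数:
--     coded_matrix (list): 由 compress_colors_to_codes 返回的二维数字矩阵。
--
--     返回:
--     str: 一个表示网格布局的多行字符串。
--     """
--     if not coded_matrix or not coded_matrix[0]:
--         return ""
--
--     m = len(coded_matrix)
--     n = len(coded_matrix[0])
--
--     output_lines = []
--
--     # 遍历字符串网格的每一行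
--     for r2 in range(2 * m + 1):
--         line_chars = []
--         # 遍历字符串网格的每一列
--         for c2 in range(2 * n + 2):
--
--             # 规则 1：一行的最后一个字符
--             if c2 == 2 * n + 1:
--                 line_chars.append('`')
--                 continue
--
--             # 规则 2：网格线的交点或单元格中心
--             if (r2 % 2 == 0 and c2 % 2 == 0) or (r2 % 2 != 0 and c2 % 2 != 0):
--                 line_chars.append(' ')
--                 continue
--
--             # 规则 3：最上或最下边界的水平线
--             if (r2 == 0 or r2 == 2 * m) and c2 % 2 != 0:
--                 line_chars.append('-')
--                 continue
--
--             # 规则 4：最左或最右边界的垂直线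
--             if (c2 == 0 or c2 == 2 * n) and r2 % 2 != 0:
--                 line_chars.append('|')
--                 continue
--
--             # 规则 5：内部水平线
--             if r2 % 2 == 0 and c2 % 2 != 0:
--                 r1 = r2 // 2
--                 c1 = (c2 - 1) // 2
--                 # 比较相邻单元格的数字
--                 if coded_matrix[r1 - 1][c1] == coded_matrix[r1][c1]:
--                     line_chars.append(' ')
--                 else:
--                     line_chars.append('-')
--                 continue
--
--             # 规则 6：内部垂直线
--             if r2 % 2 != 0 and c2 % 2 == 0:
--                 r1 = (r2 - 1) // 2
--                 c1 = c2 // 2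
--                 # 比较相邻单元格的数字
--                 if coded_matrix[r1][c1 - 1] == coded_matrix[r1][c1]:
--                     line_chars.append(' ')
--                 else:
--                     line_chars.append('|')
--                 continue
--
--         output_lines.append("".join(line_chars))
--
--     return "\n".join(output_lines)
-- ===== SOURCE B (Python) =====
-- def create_grid_string(coded_matrix: list[list[int]]) -> str:
--     if not coded_matrix or not coded_matrix[0]:
--         return ""
--
--     m = len(coded_matrix)
--     n = len(coded_matrix[0])
--
--     def sep_line(r):
--         # horizontal separator below logical row r-1 / above row r (r in 0..m)
--         chars = [' ']
--         for c in range(n):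
--             if r == 0 or r == m or coded_matrix[r - 1][c] != coded_matrix[r][c]:
--                 chars.append('-')
--             else:
--                 chars.append(' ')
--             chars.append(' ')
--         chars.append('`')
--         return ''.join(chars)
--
--     def cell_line(r):
--         # row of cell centers for logical row r (r in 0..m-1)
--         chars = []
--         for c in range(n):
--             if c == 0 or coded_matrix[r][c - 1] != coded_matrix[r][c]:
--                 chars.append('|')
--             else:
--                 chars.append(' ')
--             chars.append(' ')
--         chars.append('|')
--         chars.append('`')
--         return ''.join(chars)
--
--     lines = [sep_line(0)]
--     for r in range(m):
--         lines.append(cell_line(r))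
--         lines.append(sep_line(r + 1))
--     return '\n'.join(lines)
-- ===== Notes on version B (the rewrite author's own statement) =====
-- stated objective: simpler
-- what changed: Replaces the single doubled-coordinate loop over a (2m+1)x(2n+2) character grid (with a six-rule parity if-chain per character) by two dedicated row builders - a horizontal-separator line and a cell line over the logical n columns - interleaved sep(0), cell(0), sep(1), ..., sep(m).
import Mathlib
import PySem

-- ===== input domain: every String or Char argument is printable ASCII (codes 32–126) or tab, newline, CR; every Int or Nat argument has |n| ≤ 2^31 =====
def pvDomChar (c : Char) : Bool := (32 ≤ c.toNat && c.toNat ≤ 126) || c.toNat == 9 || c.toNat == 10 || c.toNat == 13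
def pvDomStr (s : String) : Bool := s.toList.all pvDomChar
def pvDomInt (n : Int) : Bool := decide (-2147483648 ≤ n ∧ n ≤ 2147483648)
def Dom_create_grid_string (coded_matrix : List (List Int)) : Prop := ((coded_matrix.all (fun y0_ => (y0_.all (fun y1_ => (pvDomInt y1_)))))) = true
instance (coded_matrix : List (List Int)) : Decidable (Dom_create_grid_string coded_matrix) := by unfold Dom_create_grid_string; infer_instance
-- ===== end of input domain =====

-- B renders the grid by interleaving two dedicated row builders (separator line / cell line over the
-- logical n columns) instead of A's single doubled-coordinate loop with a six-rule parity if-chain: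
-- a simpler decomposition (same O(m*n) work, fewer per-character branch tests).

-- ===== PORT A =====
-- One step of A's inner loop: the if-chain of rules 1–6 in A's order, each firing branch appending one
-- character ('continue'); the final 'else lc' is Python's fall-through that appends nothing.
-- Indexing uses pyGetD: Pre_ guarantees every index A reaches is in range, so the default is never read.
def stepA (cm : List (List Int)) (m n : Int) (lc : List Char) (r2 c2 : Int) : List Char :=
  if c2 = 2*n + 1 then lc ++ ['`']
  else if (PySem.Int.mod r2 2 = 0 ∧ PySem.Int.mod c2 2 = 0) ∨
          (PySem.Int.mod r2 2 ≠ 0 ∧ PySem.Int.mod c2 2 ≠ 0) then lc ++ [' ']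
  else if (r2 = 0 ∨ r2 = 2*m) ∧ PySem.Int.mod c2 2 ≠ 0 then lc ++ ['-']
  else if (c2 = 0 ∨ c2 = 2*n) ∧ PySem.Int.mod r2 2 ≠ 0 then lc ++ ['|']
  else if PySem.Int.mod r2 2 = 0 ∧ PySem.Int.mod c2 2 ≠ 0 then
    (if PySem.List.pyGetD (PySem.List.pyGetD cm (PySem.Int.floordiv r2 2 - 1) []) (PySem.Int.floordiv (c2 - 1) 2) 0 =
        PySem.List.pyGetD (PySem.List.pyGetD cm (PySem.Int.floordiv r2 2) []) (PySem.Int.floordiv (c2 - 1) 2) 0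
     then lc ++ [' '] else lc ++ ['-'])
  else if PySem.Int.mod r2 2 ≠ 0 ∧ PySem.Int.mod c2 2 = 0 then
    (if PySem.List.pyGetD (PySem.List.pyGetD cm (PySem.Int.floordiv (r2 - 1) 2) []) (PySem.Int.floordiv c2 2 - 1) 0 =
        PySem.List.pyGetD (PySem.List.pyGetD cm (PySem.Int.floordiv (r2 - 1) 2) []) (PySem.Int.floordiv c2 2) 0
     then lc ++ [' '] else lc ++ ['|'])
  else lc

def create_grid_string (coded_matrix : List (List Int)) : String :=
  if coded_matrix = [] ∨ coded_matrix.headD [] = [] then "" else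
  let m : Int := PySem.List.len coded_matrix
  let n : Int := PySem.List.len (coded_matrix.headD [])
  let output_lines : List String :=
    (PySem.List.pyRange 0 (2*m + 1) 1).foldl
      (fun lines r2 =>
        lines ++ [String.mk ((PySem.List.pyRange 0 (2*n + 2) 1).foldl
          (fun lc c2 => stepA coded_matrix m n lc r2 c2) [])]) []
  PySem.Str.join "\n" output_lines

-- ===== PORT B =====
def sepLineB (cm : List (List Int)) (m n : Int) (r : Int) : String :=
  String.mk (((PySem.List.pyRange 0 n 1).foldl
    (fun chars c =>
      chars ++ [if r = 0 ∨ r = m ∨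
                   ¬ (PySem.List.pyGetD (PySem.List.pyGetD cm (r - 1) []) c 0 =
                      PySem.List.pyGetD (PySem.List.pyGetD cm r []) c 0)
                then '-' else ' '] ++ [' ']) [' ']) ++ ['`'])

def cellLineB (cm : List (List Int)) (m n : Int) (r : Int) : String :=
  String.mk (((PySem.List.pyRange 0 n 1).foldl
    (fun chars c =>
      chars ++ [if c = 0 ∨
                   ¬ (PySem.List.pyGetD (PySem.List.pyGetD cm r []) (c - 1) 0 =
                      PySem.List.pyGetD (PySem.List.pyGetD cm r []) c 0)
                then '|' else ' '] ++ [' ']) []) ++ ['|'] ++ ['`'])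

def create_grid_string_alt (coded_matrix : List (List Int)) : String :=
  if coded_matrix = [] ∨ coded_matrix.headD [] = [] then "" else
  let m : Int := PySem.List.len coded_matrix
  let n : Int := PySem.List.len (coded_matrix.headD [])
  let lines : List String :=
    (PySem.List.pyRange 0 m 1).foldl
      (fun ls r => ls ++ [cellLineB coded_matrix m n r] ++ [sepLineB coded_matrix m n (r + 1)])
      [sepLineB coded_matrix m n 0]
  PySem.Str.join "\n" lines

-- ===== PRECONDITION & SPEC =====
-- Pre_ excludes ragged matrices with a row shorter than row 0, on which Python A (and B) raise IndexError.
def Pre_create_grid_string (coded_matrix : List (List Int)) : Prop :=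
  ∀ row ∈ coded_matrix, (coded_matrix.headD []).length ≤ row.length
instance (coded_matrix : List (List Int)) : Decidable (Pre_create_grid_string coded_matrix) := by
  unfold Pre_create_grid_string; infer_instance
def pvWitness_create_grid_string : List (List Int) := [[1, 1], [1, 2]]

def Spec_create_grid_string (coded_matrix : List (List Int)) (out : String) : Prop :=
  out = create_grid_string_alt coded_matrix
instance (coded_matrix : List (List Int)) (out : String) : Decidable (Spec_create_grid_string coded_matrix out) := by
  unfold Spec_create_grid_string; infer_instance

-- ===== CLAIM (what is proved, stated in full; the proofs are below) =====
def Claim_equal_create_grid_string : Prop := ∀ (coded_matrix : List (List Int)), Dom_create_grid_string coded_matrix → Pre_create_grid_string coded_matrix → Spec_create_grid_string coded_matrix (create_grid_string coded_matrix)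

-- ===== LEMMAS AND PROOFS =====

-- clean per-position character function of A's inner loop (proof helper)
def gA (cm : List (List Int)) (m n r2 c2 : Int) : Char :=
  if c2 = 2*n + 1 then '`'
  else if (PySem.Int.mod r2 2 = 0 ∧ PySem.Int.mod c2 2 = 0) ∨
          (PySem.Int.mod r2 2 ≠ 0 ∧ PySem.Int.mod c2 2 ≠ 0) then ' '
  else if (r2 = 0 ∨ r2 = 2*m) ∧ PySem.Int.mod c2 2 ≠ 0 then '-'
  else if (c2 = 0 ∨ c2 = 2*n) ∧ PySem.Int.mod r2 2 ≠ 0 then '|'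
  else if PySem.Int.mod r2 2 = 0 ∧ PySem.Int.mod c2 2 ≠ 0 then
    (if PySem.List.pyGetD (PySem.List.pyGetD cm (PySem.Int.floordiv r2 2 - 1) []) (PySem.Int.floordiv (c2 - 1) 2) 0 =
        PySem.List.pyGetD (PySem.List.pyGetD cm (PySem.Int.floordiv r2 2) []) (PySem.Int.floordiv (c2 - 1) 2) 0
     then ' ' else '-')
  else
    (if PySem.List.pyGetD (PySem.List.pyGetD cm (PySem.Int.floordiv (r2 - 1) 2) []) (PySem.Int.floordiv c2 2 - 1) 0 =
        PySem.List.pyGetD (PySem.List.pyGetD cm (PySem.Int.floordiv (r2 - 1) 2) []) (PySem.Int.floordiv c2 2) 0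
     then ' ' else '|')

theorem stepA_eq (cm : List (List Int)) (m n : Int) (lc : List Char) (r2 c2 : Int) :
    stepA cm m n lc r2 c2 = lc ++ [gA cm m n r2 c2] := by
  have hr := PySem.Int.mod_nonneg r2 (b := 2) (by norm_num)
  have hr' := PySem.Int.mod_lt r2 (b := 2) (by norm_num)
  have hc := PySem.Int.mod_nonneg c2 (b := 2) (by norm_num)
  have hc' := PySem.Int.mod_lt c2 (b := 2) (by norm_num)
  unfold stepA gA
  split_ifs <;> first | rfl | omega

theorem mod_two_mul (a : Int) : PySem.Int.mod (2*a) 2 = 0 := by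
  rw [PySem.Int.mod_eq_emod_of_pos (by norm_num)]; omega

theorem mod_two_mul_add_one (a : Int) : PySem.Int.mod (2*a + 1) 2 = 1 := by
  rw [PySem.Int.mod_eq_emod_of_pos (by norm_num)]; omega

theorem fdiv_two_mul (a : Int) : PySem.Int.floordiv (2*a) 2 = a := by
  rw [PySem.Int.floordiv_eq_ediv_of_pos (by norm_num)]; omega

-- evaluation of gA at the five position shapes
theorem gA_even_even (cm : List (List Int)) (m n r c : Int) : gA cm m n (2*r) (2*c) = ' ' := by
  unfold gA
  rw [if_neg (by omega), if_pos (Or.inl ⟨mod_two_mul r, mod_two_mul c⟩)]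

theorem gA_even_odd (cm : List (List Int)) (m n r c : Int) (hc : c ≠ n) :
    gA cm m n (2*r) (2*c + 1) =
      (if r = 0 ∨ r = m ∨
          ¬ (PySem.List.pyGetD (PySem.List.pyGetD cm (r - 1) []) c 0 =
             PySem.List.pyGetD (PySem.List.pyGetD cm r []) c 0)
       then '-' else ' ') := by
  unfold gA
  rw [if_neg (by omega)]
  rw [if_neg (by simp [mod_two_mul, mod_two_mul_add_one])]
  have hsimp : PySem.Int.floordiv (2*r) 2 = r := fdiv_two_mul r
  have hsimp2 : PySem.Int.floordiv (2*c + 1 - 1) 2 = c := by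
    have : 2*c + 1 - 1 = 2*c := by ring
    rw [this, fdiv_two_mul]
  by_cases hb : r = 0 ∨ r = m
  · rw [if_pos ⟨by omega, by simp [mod_two_mul_add_one]⟩, if_pos (by tauto)]
  · rw [if_neg (by simp [hb]), if_neg (by simp [mod_two_mul]),
        if_pos ⟨mod_two_mul r, by simp [mod_two_mul_add_one]⟩, hsimp, hsimp2]
    by_cases he : PySem.List.pyGetD (PySem.List.pyGetD cm (r - 1) []) c 0 =
                  PySem.List.pyGetD (PySem.List.pyGetD cm r []) c 0
    · simp [he, hb]
    · simp [he, hb]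

theorem gA_odd_even (cm : List (List Int)) (m n r c : Int) (hc : c ≠ n) :
    gA cm m n (2*r + 1) (2*c) =
      (if c = 0 ∨
          ¬ (PySem.List.pyGetD (PySem.List.pyGetD cm r []) (c - 1) 0 =
             PySem.List.pyGetD (PySem.List.pyGetD cm r []) c 0)
       then '|' else ' ') := by
  unfold gA
  rw [if_neg (by omega)]
  rw [if_neg (by simp [mod_two_mul, mod_two_mul_add_one])]
  rw [if_neg (by simp [mod_two_mul])]
  have hsimp : PySem.Int.floordiv (2*r + 1 - 1) 2 = r := by
    have : 2*r + 1 - 1 = 2*r := by ring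
    rw [this, fdiv_two_mul]
  have hsimp2 : PySem.Int.floordiv (2*c) 2 = c := fdiv_two_mul c
  by_cases hb : c = 0
  · rw [if_pos ⟨Or.inl (by omega), by simp [mod_two_mul_add_one]⟩, if_pos (by tauto)]
  · rw [if_neg (by simp [hb]; omega), if_neg (by simp [mod_two_mul_add_one]), hsimp, hsimp2]
    by_cases he : PySem.List.pyGetD (PySem.List.pyGetD cm r []) (c - 1) 0 =
                  PySem.List.pyGetD (PySem.List.pyGetD cm r []) c 0
    · simp [he, hb]
    · simp [he, hb]

theorem gA_odd_odd (cm : List (List Int)) (m n r c : Int) (hc : c ≠ n) :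
    gA cm m n (2*r + 1) (2*c + 1) = ' ' := by
  unfold gA
  rw [if_neg (by omega),
      if_pos (Or.inr ⟨by simp [mod_two_mul_add_one], by simp [mod_two_mul_add_one]⟩)]

theorem gA_odd_last_bar (cm : List (List Int)) (m n r : Int) :
    gA cm m n (2*r + 1) (2*n) = '|' := by
  unfold gA
  rw [if_neg (by omega)]
  rw [if_neg (by simp [mod_two_mul, mod_two_mul_add_one])]
  rw [if_neg (by simp [mod_two_mul])]
  rw [if_pos ⟨Or.inr rfl, by simp [mod_two_mul_add_one]⟩]

theorem gA_backtick (cm : List (List Int)) (m n r2 : Int) : gA cm m n r2 (2*n + 1) = '`' := by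
  unfold gA; rw [if_pos rfl]

-- generic loop shapes
theorem foldl_two {α : Type} (f h : Int → α) (init : List α) (k : Nat) :
    (PySem.List.pyRange 0 (k : Int) 1).foldl (fun ls r => ls ++ [f r] ++ [h r]) init
      = init ++ (List.range k).flatMap (fun r : Nat => [f (r : Int), h (r : Int)]) := by
  induction k with
  | zero => simp [PySem.List.pyRange_zero_nat]
  | succ k ih =>
    have hk : ((k + 1 : Nat) : Int) = (k : Int) + 1 := by push_cast; ring
    rw [hk, PySem.List.pyRange_one_succ_right (by positivity), List.foldl_append, ih]
    simp [List.range_succ]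

theorem map_pair {α : Type} (g : Int → α) (k : Nat) :
    (PySem.List.pyRange 0 (2 * (k : Int)) 1).map g
      = (List.range k).flatMap (fun c : Nat => [g (2 * (c : Int)), g (2 * (c : Int) + 1)]) := by
  induction k with
  | zero => simp [PySem.List.pyRange_zero_nat]
  | succ k ih =>
    have hk : 2 * ((k + 1 : Nat) : Int) = (2 * (k : Int) + 1) + 1 := by push_cast; ring
    rw [hk, PySem.List.pyRange_one_succ_right (by positivity),
        PySem.List.pyRange_one_succ_right (by positivity), List.map_append, List.map_append, ih]
    simp [List.range_succ]

theorem interleave_shift {α : Type} (s c : Nat → α) (M : Nat) :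
    (List.range M).flatMap (fun r => [s r, c r]) ++ [s M]
      = s 0 :: (List.range M).flatMap (fun r => [c r, s (r + 1)]) := by
  induction M with
  | zero => simp
  | succ M ih =>
    rw [List.range_succ, List.flatMap_append, List.flatMap_append]
    simp only [List.flatMap_cons, List.flatMap_nil, List.append_nil]
    calc ((List.range M).flatMap (fun r => [s r, c r]) ++ [s M, c M]) ++ [s (M + 1)]
        = ((List.range M).flatMap (fun r => [s r, c r]) ++ [s M]) ++ [c M, s (M + 1)] := by
          simp
      _ = s 0 :: ((List.range M).flatMap (fun r => [c r, s (r + 1)]) ++ [c M, s (M + 1)]) := by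
          rw [ih]; simp

-- the two per-line equalities
theorem line_sep (cm : List (List Int)) (m : Int) (N : Nat) (r : Int) :
    String.mk ((PySem.List.pyRange 0 (2 * (N : Int) + 2) 1).map (gA cm m (N : Int) (2*r)))
      = sepLineB cm m (N : Int) r := by
  have h2 : 2 * (N : Int) + 2 = 2 * ((N + 1 : Nat) : Int) := by push_cast; ring
  rw [h2, map_pair]
  rw [List.range_succ, List.flatMap_append]
  unfold sepLineB
  rw [foldl_two (fun c => if r = 0 ∨ r = m ∨
        ¬ (PySem.List.pyGetD (PySem.List.pyGetD cm (r - 1) []) c 0 =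
           PySem.List.pyGetD (PySem.List.pyGetD cm r []) c 0) then '-' else ' ') (fun _ => ' ')]
  apply congrArg
  have hmap : (List.range N).flatMap
        (fun c : Nat => [gA cm m (N : Int) (2*r) (2 * (c : Int)),
                   gA cm m (N : Int) (2*r) (2 * (c : Int) + 1)])
      = (List.range N).flatMap
        (fun c : Nat => [' ',
          if r = 0 ∨ r = m ∨
             ¬ (PySem.List.pyGetD (PySem.List.pyGetD cm (r - 1) []) (c : Int) 0 =
                PySem.List.pyGetD (PySem.List.pyGetD cm r []) (c : Int) 0) then '-' else ' ']) := by
    apply List.flatMap_congr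
    intro c hcmem
    have hlt : c < N := List.mem_range.mp hcmem
    rw [gA_even_even, gA_even_odd cm m (N : Int) r (c : Int) (by exact_mod_cast Nat.ne_of_lt hlt)]
  rw [hmap]
  have hlast : gA cm m (N : Int) (2*r) (2 * ((N : Nat) : Int)) = ' ' := gA_even_even cm m _ r _
  have hlast2 : gA cm m (N : Int) (2*r) (2 * ((N : Nat) : Int) + 1) = '`' := gA_backtick cm m _ _
  simp only [List.flatMap_cons, List.flatMap_nil, List.append_nil, hlast, hlast2]
  have := interleave_shift (fun _ : Nat => ' ')
      (fun c : Nat => if r = 0 ∨ r = m ∨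
             ¬ (PySem.List.pyGetD (PySem.List.pyGetD cm (r - 1) []) (c : Int) 0 =
                PySem.List.pyGetD (PySem.List.pyGetD cm r []) (c : Int) 0) then '-' else ' ') N
  calc (List.range N).flatMap (fun c : Nat => [' ',
          if r = 0 ∨ r = m ∨
             ¬ (PySem.List.pyGetD (PySem.List.pyGetD cm (r - 1) []) (c : Int) 0 =
                PySem.List.pyGetD (PySem.List.pyGetD cm r []) (c : Int) 0) then '-' else ' ']) ++ [' ', '`']
      = ((List.range N).flatMap (fun c : Nat => [' ',
          if r = 0 ∨ r = m ∨
             ¬ (PySem.List.pyGetD (PySem.List.pyGetD cm (r - 1) []) (c : Int) 0 =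
                PySem.List.pyGetD (PySem.List.pyGetD cm r []) (c : Int) 0) then '-' else ' ']) ++ [' ']) ++ ['`'] := by simp
    _ = _ := by rw [this]; simp

theorem line_cell (cm : List (List Int)) (m : Int) (N : Nat) (r : Int) :
    String.mk ((PySem.List.pyRange 0 (2 * (N : Int) + 2) 1).map (gA cm m (N : Int) (2*r + 1)))
      = cellLineB cm m (N : Int) r := by
  have h2 : 2 * (N : Int) + 2 = 2 * ((N + 1 : Nat) : Int) := by push_cast; ring
  rw [h2, map_pair]
  rw [List.range_succ, List.flatMap_append]
  unfold cellLineB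
  rw [foldl_two (fun c => if c = 0 ∨
        ¬ (PySem.List.pyGetD (PySem.List.pyGetD cm r []) (c - 1) 0 =
           PySem.List.pyGetD (PySem.List.pyGetD cm r []) c 0) then '|' else ' ') (fun _ => ' ')]
  apply congrArg
  have hmap : (List.range N).flatMap
        (fun c : Nat => [gA cm m (N : Int) (2*r + 1) (2 * (c : Int)),
                   gA cm m (N : Int) (2*r + 1) (2 * (c : Int) + 1)])
      = (List.range N).flatMap
        (fun c : Nat => [if (c : Int) = 0 ∨
             ¬ (PySem.List.pyGetD (PySem.List.pyGetD cm r []) ((c : Int) - 1) 0 =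
                PySem.List.pyGetD (PySem.List.pyGetD cm r []) (c : Int) 0) then '|' else ' ', ' ']) := by
    apply List.flatMap_congr
    intro c hcmem
    have hlt : c < N := List.mem_range.mp hcmem
    rw [gA_odd_even cm m (N : Int) r (c : Int) (by exact_mod_cast Nat.ne_of_lt hlt),
        gA_odd_odd cm m (N : Int) r (c : Int) (by exact_mod_cast Nat.ne_of_lt hlt)]
  rw [hmap]
  have hlast : gA cm m (N : Int) (2*r + 1) (2 * ((N : Nat) : Int)) = '|' := gA_odd_last_bar cm m _ r
  have hlast2 : gA cm m (N : Int) (2*r + 1) (2 * ((N : Nat) : Int) + 1) = '`' := gA_backtick cm m _ _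
  simp only [List.flatMap_cons, List.flatMap_nil, List.append_nil, hlast, hlast2]
  simp

-- ===== VERDICT (by name: the statement is the Claim_ definition above) =====
theorem create_grid_string_spec : Claim_equal_create_grid_string := by
  intro cm _ _
  unfold Spec_create_grid_string create_grid_string create_grid_string_alt
  by_cases hg : cm = [] ∨ cm.headD [] = []
  · rw [if_pos hg, if_pos hg]
  · rw [if_neg hg, if_neg hg]
    dsimp only
    apply congrArg
    simp only [stepA_eq, PySem.List.foldl_append_singleton_eq_map, List.nil_append,
               PySem.List.len_eq]
    set M := cm.length with hM
    set N := (cm.headD []).length with hN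
    rw [PySem.List.pyRange_one_succ_right (a := 0) (b := 2 * (M : Int)) (by positivity),
        List.map_append, map_pair]
    have hlines : (List.range M).flatMap
          (fun r : Nat => [String.mk ((PySem.List.pyRange 0 (2 * (N : Int) + 2) 1).map
                        (gA cm (M : Int) (N : Int) (2 * (r : Int)))),
                     String.mk ((PySem.List.pyRange 0 (2 * (N : Int) + 2) 1).map
                        (gA cm (M : Int) (N : Int) (2 * (r : Int) + 1)))])
        = (List.range M).flatMap
          (fun r : Nat => [sepLineB cm (M : Int) (N : Int) (r : Int),
                     cellLineB cm (M : Int) (N : Int) (r : Int)]) := by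
      apply List.flatMap_congr
      intro r _
      rw [line_sep, line_cell]
    rw [hlines]
    simp only [List.map_cons, List.map_nil]
    rw [line_sep cm (M : Int) N ((M : Nat) : Int)]
    rw [foldl_two (fun r => cellLineB cm (M : Int) (N : Int) r)
          (fun r => sepLineB cm (M : Int) (N : Int) (r + 1))]
    have := interleave_shift (fun r : Nat => sepLineB cm (M : Int) (N : Int) (r : Int))
        (fun r : Nat => cellLineB cm (M : Int) (N : Int) (r : Int)) M
    simp only [Nat.cast_zero] at this
    rw [this]
    simp [Nat.cast_add, Nat.cast_one]
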